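-- pv_equiv track=rewrite | github.com/kosta2222/ConfNN_C | py/make_C_weights.py | change_to_C_matrices
-- ===== SOURCE A (Python) =====
-- def change_to_C_matrices(matrices:str)->str:
--  list_C_matr:list=[' ']*len(matrices)
--  cnt=0
--  for i in matrices:
--    if i=='[':
--       list_C_matr[cnt]='{'
--
--    elif i==']':
--        list_C_matr[cnt]='}'
--
--    elif i.isdigit():
--        list_C_matr[cnt]=i
--
--    elif i=='-' or i=='.' or i==',' or 'e':
--        list_C_matr[cnt]=i
--
--    cnt+=1
--  return ''.join(list_C_matr)
-- ===== SOURCE B (Python) =====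
-- def change_to_C_matrices(matrices: str) -> str:
--     # A's final 'or e' branch is always truthy, so A is exactly the substitution
--     # '['->'{', ']'->'}': perform it as two staged split/join passes over segments.
--     opened = '{'.join(matrices.split('['))
--     return '}'.join(opened.split(']'))
-- ===== Notes on version B (the rewrite author's own statement) =====
-- stated objective: alternative
-- what changed: The per-character if/elif cascade writing into a preallocated list (whose always-truthy 'or e' branch copies every other character through) is replaced by two staged segment passes: split the string on the open bracket and join the segments with an open brace, then split that on the close bracket and join with a close brace; the passes run in C-level str.split/str.join instead of a Python-level loop.
import Mathlib
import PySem

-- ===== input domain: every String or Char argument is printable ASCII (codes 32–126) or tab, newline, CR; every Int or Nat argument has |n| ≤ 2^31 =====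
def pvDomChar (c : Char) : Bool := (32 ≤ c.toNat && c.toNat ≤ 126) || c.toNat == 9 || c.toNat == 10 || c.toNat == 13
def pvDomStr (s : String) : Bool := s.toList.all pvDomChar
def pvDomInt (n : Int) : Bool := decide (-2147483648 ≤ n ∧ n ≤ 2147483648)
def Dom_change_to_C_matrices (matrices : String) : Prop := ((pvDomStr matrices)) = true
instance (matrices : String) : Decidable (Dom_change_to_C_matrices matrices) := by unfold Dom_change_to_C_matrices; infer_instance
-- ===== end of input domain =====

-- B replaces A's per-character if/elif cascade writing into a preallocated buffer
-- (whose always-truthy 'or e' branch copies everything else) by two staged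
-- split/join passes over segment lists; a different decomposition of the same task.


-- ===== PORT A =====
-- literal port: preallocated list of spaces, counter, if/elif cascade (the last
-- branch's 'or e' is always truthy in Python, so it is an unconditional else)
def change_to_C_matrices (matrices : String) : String :=
  let cs := matrices.toList
  let st := cs.foldl (fun (st : List Char × Nat) i =>
      if i = '[' then (st.1.set st.2 '{', st.2 + 1)
      else if i = ']' then (st.1.set st.2 '}', st.2 + 1)
      else if PySem.Chars.isdigit i then (st.1.set st.2 i, st.2 + 1)
      else (st.1.set st.2 i, st.2 + 1))
    (List.replicate cs.length ' ', 0)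
  String.ofList st.1

-- ===== PORT B =====
-- two staged passes: '{'.join(matrices.split('[')) then '}'.join(….split(']'));
-- split/join with a non-empty separator is PySem.Chars.splitOn / PySem.Chars.join (exact)
def change_to_C_matrices_alt (matrices : String) : String :=
  let opened := PySem.Chars.join ['{'] (PySem.Chars.splitOn matrices.toList ['['])
  String.ofList (PySem.Chars.join ['}'] (PySem.Chars.splitOn opened [']']))

-- ===== PRECONDITION & SPEC =====
def Spec_change_to_C_matrices (matrices : String) (out : String) : Prop := out = change_to_C_matrices_alt matrices
instance (matrices : String) (out : String) : Decidable (Spec_change_to_C_matrices matrices out) := by unfold Spec_change_to_C_matrices; infer_instance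

-- ===== CLAIM (what is proved, stated in full; the proofs are below) =====
def Claim_equal_change_to_C_matrices : Prop := ∀ (matrices : String), Dom_change_to_C_matrices matrices → Spec_change_to_C_matrices matrices (change_to_C_matrices matrices)

-- ===== LEMMAS AND PROOFS =====

-- the one-character substitution A's cascade performs
def pvSubst (c r x : Char) : Char := if x = c then r else x

-- specification of splitting on a single character
lemma pvModifyHead_id (l : List (List Char)) : List.modifyHead (fun x => x) l = l := by
  cases l <;> rfl

def pvSplitC (c : Char) : List Char → List (List Char)
  | [] => [[]]
  | x :: xs => if x = c then [] :: pvSplitC c xs else (pvSplitC c xs).modifyHead (x :: ·)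

lemma pvSplitC_ne_nil (c : Char) (l : List Char) : pvSplitC c l ≠ [] := by
  induction l with
  | nil => simp [pvSplitC]
  | cons x xs ih =>
    simp only [pvSplitC]
    split_ifs
    · simp
    · cases h : pvSplitC c xs with
      | nil => exact absurd h ih
      | cons a b => simp

lemma go_eq (c : Char) (fuel : Nat) (l cur : List Char) (accs : List (List Char))
    (h : l.length ≤ fuel) :
    PySem.Chars.splitOn.go [c] fuel l cur accs
      = accs.reverse ++ (pvSplitC c l).modifyHead (cur.reverse ++ ·) := by
  induction l generalizing fuel cur accs with
  | nil =>
    cases fuel <;> simp [PySem.Chars.splitOn.go, pvSplitC]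
  | cons x rest ih =>
    cases fuel with
    | zero => simp at h
    | succ f =>
      have hf : rest.length ≤ f := by simpa using h
      by_cases hx : x = c
      · subst hx
        have hpre : List.isPrefixOf [x] (x :: rest) = true := by
          simp [List.isPrefixOf]
        rw [show PySem.Chars.splitOn.go [x] (f+1) (x :: rest) cur accs
              = PySem.Chars.splitOn.go [x] f rest [] (cur.reverse :: accs) by
            simp [PySem.Chars.splitOn.go, hpre]]
        rw [ih f [] (cur.reverse :: accs) hf]
        simp [pvSplitC, pvModifyHead_id]
      · have hpre : List.isPrefixOf [c] (x :: rest) = false := by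
          simp [List.isPrefixOf]; exact fun h' => absurd h'.symm hx
        rw [show PySem.Chars.splitOn.go [c] (f+1) (x :: rest) cur accs
              = PySem.Chars.splitOn.go [c] f rest (x :: cur) accs by
            simp [PySem.Chars.splitOn.go, hpre]]
        rw [ih f (x :: cur) accs hf]
        obtain ⟨hd, tl, hsp⟩ := List.exists_cons_of_ne_nil (pvSplitC_ne_nil c rest)
        simp [pvSplitC, hx, hsp]

lemma splitOn_eq (c : Char) (l : List Char) :
    PySem.Chars.splitOn l [c] = pvSplitC c l := by
  rw [PySem.Chars.splitOn, go_eq c (l.length + 1) l [] [] (by omega)]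
  simp [pvModifyHead_id]

lemma join_splitC (c r : Char) (l : List Char) :
    PySem.Chars.join [r] (pvSplitC c l) = l.map (pvSubst c r) := by
  induction l with
  | nil => simp [pvSplitC, PySem.Chars.join, List.intercalate]
  | cons x rest ih =>
    by_cases hx : x = c
    · subst hx
      obtain ⟨hd, tl, hsp⟩ := List.exists_cons_of_ne_nil (pvSplitC_ne_nil x rest)
      simp only [pvSplitC, hsp] at *
      simp only [PySem.Chars.join, List.intercalate] at *
      simpa [pvSubst, List.intersperse] using ih
    · obtain ⟨hd, tl, hsp⟩ := List.exists_cons_of_ne_nil (pvSplitC_ne_nil c rest)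
      simp only [pvSplitC, if_neg hx, hsp] at *
      simp only [List.modifyHead, PySem.Chars.join, List.intercalate] at *
      cases tl <;> simp_all [pvSubst, List.intersperse]

-- one split/join pass is the one-character substitution
lemma pass_eq (c r : Char) (l : List Char) :
    PySem.Chars.join [r] (PySem.Chars.splitOn l [c]) = l.map (pvSubst c r) := by
  rw [splitOn_eq, join_splitC]

-- A's cascade body computes, in each branch, exactly the composed substitution
lemma step_eq :
    (fun (st : List Char × Nat) i =>
      if i = '[' then (st.1.set st.2 '{', st.2 + 1)
      else if i = ']' then (st.1.set st.2 '}', st.2 + 1)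
      else if PySem.Chars.isdigit i then (st.1.set st.2 i, st.2 + 1)
      else (st.1.set st.2 i, st.2 + 1))
    = (fun (st : List Char × Nat) i => (st.1.set st.2 (pvSubst ']' '}' (pvSubst '[' '{' i)), st.2 + 1)) := by
  funext st i
  by_cases h1 : i = '['
  · subst h1; rfl
  · by_cases h2 : i = ']'
    · subst h2; rfl
    · simp [pvSubst, h1, h2]

-- setting at the length of the left part of an append with a cons on the right
lemma set_at_boundary (a : List Char) (x : Char) (b : List Char) (v : Char) :
    (a ++ x :: b).set a.length v = a ++ v :: b := by
  induction a with
  | nil => simp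
  | cons h t ih => simp [ih]

-- loop invariant: starting from (done ++ spaces, done.length), A's loop appends
-- the substituted characters
lemma loop_eq (cs done : List Char) :
    List.foldl (fun (st : List Char × Nat) i => (st.1.set st.2 (pvSubst ']' '}' (pvSubst '[' '{' i)), st.2 + 1))
      (done ++ List.replicate cs.length ' ', done.length) cs
    = (done ++ cs.map (fun i => pvSubst ']' '}' (pvSubst '[' '{' i)), done.length + cs.length) := by
  induction cs generalizing done with
  | nil => simp
  | cons c rest ih =>
    rw [List.foldl_cons]
    have hrep : List.replicate (c :: rest).length ' ' = ' ' :: List.replicate rest.length ' ' := rfl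
    have hset : (done ++ List.replicate (c :: rest).length ' ').set done.length (pvSubst ']' '}' (pvSubst '[' '{' c))
        = (done ++ [pvSubst ']' '}' (pvSubst '[' '{' c)]) ++ List.replicate rest.length ' ' := by
      rw [hrep, set_at_boundary]; simp
    have hlen : done.length + 1 = (done ++ [pvSubst ']' '}' (pvSubst '[' '{' c)]).length := by simp
    rw [show ((done ++ List.replicate (c :: rest).length ' ').set done.length (pvSubst ']' '}' (pvSubst '[' '{' c)), done.length + 1)
          = ((done ++ [pvSubst ']' '}' (pvSubst '[' '{' c)]) ++ List.replicate rest.length ' ', (done ++ [pvSubst ']' '}' (pvSubst '[' '{' c)]).length)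
        from by rw [hset, hlen], ih]
    simp; omega

-- ===== VERDICT (by name: the statement is the Claim_ definition above) =====
theorem change_to_C_matrices_spec : Claim_equal_change_to_C_matrices := by
  intro matrices _
  unfold Spec_change_to_C_matrices change_to_C_matrices change_to_C_matrices_alt
  rw [step_eq]
  have hA := loop_eq matrices.toList []
  simp only [List.nil_append, List.length_nil, Nat.zero_add] at hA
  simp only [hA]
  rw [pass_eq, pass_eq, List.map_map]
  rfl
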